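-- pv_equiv track=rewrite | github.com/918pitman/GolfBallz | scripts/genpath.py | get_poly_segments
-- ===== SOURCE A (Python) =====
-- def get_poly_segments(poly):
--     segments = []
--     for i, p in enumerate(poly):
--         one_i = i + 1
--         if one_i == len(poly):
--             segments.append([poly[i], poly[0]])
--         else:
--             segments.append([poly[i], poly[one_i]])
--     return segments
-- ===== SOURCE B (Python) =====
-- def get_poly_segments(poly):
--     if not poly:
--         return []
--     first = poly[0]
--
--     def go(a, rest):
--         if not rest:
--             return [[a, first]]
--         return [[a, rest[0]]] + go(rest[0], rest[1:])
--
--     return go(first, poly[1:])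
-- ===== Notes on version B (the rewrite author's own statement) =====
-- stated objective: alternative
-- what changed: Replaces A's index loop with its last-iteration wrap-around branch by a structural recursion over the list that emits each consecutive pair and closes with the remembered first vertex in the base case; no indexing or length arithmetic at all.
import Mathlib
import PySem

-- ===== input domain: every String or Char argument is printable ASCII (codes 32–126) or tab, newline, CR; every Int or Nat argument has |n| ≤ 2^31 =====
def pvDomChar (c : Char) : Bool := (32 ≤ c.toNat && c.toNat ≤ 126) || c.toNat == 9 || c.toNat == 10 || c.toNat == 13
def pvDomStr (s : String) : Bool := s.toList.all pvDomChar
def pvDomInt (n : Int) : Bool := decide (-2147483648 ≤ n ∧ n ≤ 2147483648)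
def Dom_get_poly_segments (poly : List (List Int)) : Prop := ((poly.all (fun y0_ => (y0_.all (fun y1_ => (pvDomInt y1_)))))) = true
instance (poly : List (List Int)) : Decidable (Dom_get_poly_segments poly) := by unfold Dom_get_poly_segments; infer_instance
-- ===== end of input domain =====

-- B replaces A's index loop with its last-iteration wrap-around branch by a structural
-- recursion over the list: emit each consecutive pair, close with the first vertex at the end.

-- ===== PORT A =====
-- loop 'for i, p in enumerate(poly)'; indices i, i+1 (when taken) and 0 are always in range,
-- so pyGetD with default [] is exact here.
def get_poly_segments (poly : List (List Int)) : List (List (List Int)) :=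
  (PySem.List.enumerate poly).foldl (fun segments ip =>
    let i := ip.1
    let one_i := i + 1
    if one_i = PySem.List.len poly then
      segments ++ [[PySem.List.pyGetD poly i [], PySem.List.pyGetD poly 0 []]]
    else
      segments ++ [[PySem.List.pyGetD poly i [], PySem.List.pyGetD poly one_i []]]) []

-- ===== PORT B =====
-- helper 'go' of Source B (closure argument 'first' passed explicitly)
def get_poly_segments_go (first : List Int) (a : List Int) : List (List Int) → List (List (List Int))
  | [] => [[a, first]]
  | b :: rest => [[a, b]] ++ get_poly_segments_go first b rest

def get_poly_segments_alt : List (List Int) → List (List (List Int))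
  | [] => []
  | first :: rest => get_poly_segments_go first first rest

-- ===== PRECONDITION & SPEC =====
def Spec_get_poly_segments (poly : List (List Int)) (out : List (List (List Int))) : Prop := out = get_poly_segments_alt poly
instance (poly : List (List Int)) (out : List (List (List Int))) : Decidable (Spec_get_poly_segments poly out) := by unfold Spec_get_poly_segments; infer_instance

-- ===== CLAIM (what is proved, stated in full; the proofs are below) =====
def Claim_equal_get_poly_segments : Prop := ∀ (poly : List (List Int)), Dom_get_poly_segments poly → Spec_get_poly_segments poly (get_poly_segments poly)

-- ===== LEMMAS AND PROOFS =====

-- A's fold appends one element per enumerate pair, so it is a map over enumerate.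
theorem getA_eq_map (poly : List (List Int)) :
    get_poly_segments poly =
      (PySem.List.enumerate poly).map (fun ip =>
        if ip.1 + 1 = PySem.List.len poly then
          [PySem.List.pyGetD poly ip.1 [], PySem.List.pyGetD poly 0 []]
        else
          [PySem.List.pyGetD poly ip.1 [], PySem.List.pyGetD poly (ip.1 + 1) []]) := by
  unfold get_poly_segments
  rw [show (fun (segments : List (List (List Int))) (ip : Int × List Int) =>
      let i := ip.1
      let one_i := i + 1
      if one_i = PySem.List.len poly then
        segments ++ [[PySem.List.pyGetD poly i [], PySem.List.pyGetD poly 0 []]]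
      else
        segments ++ [[PySem.List.pyGetD poly i [], PySem.List.pyGetD poly one_i []]])
    = (fun segments ip => segments ++
        [if ip.1 + 1 = PySem.List.len poly then
          [PySem.List.pyGetD poly ip.1 [], PySem.List.pyGetD poly 0 []]
        else
          [PySem.List.pyGetD poly ip.1 [], PySem.List.pyGetD poly (ip.1 + 1) []]])
    from by funext s ip; dsimp only; split <;> simp_all]
  simpa using PySem.List.foldl_append_singleton_eq_map _ _ []

-- A canonical zip form both ports equal.
def zipForm (poly : List (List Int)) : List (List (List Int)) :=
  (poly.zip (poly.drop 1 ++ poly.take 1)).map (fun ab => [ab.1, ab.2])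

theorem getA_eq_zipForm (poly : List (List Int)) :
    get_poly_segments poly = zipForm poly := by
  rw [getA_eq_map]
  unfold zipForm
  apply List.ext_getElem
  · simp [PySem.List.length_enumerate]
    omega
  · intro k h1 h2
    have hk : k < poly.length := by
      simpa [PySem.List.length_enumerate] using h1
    simp only [List.getElem_map, List.getElem_zip, PySem.List.getElem_enumerate]
    by_cases hlast : k + 1 = poly.length
    · have hrot : (poly.drop 1 ++ poly.take 1)[k]'(by simp; omega) = poly[0]'(by omega) := by
        rw [List.getElem_append_right (by simp; omega)]
        rw [List.getElem_take]
        congr 1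
        simp
        omega
      rw [hrot]
      simp only [show ((0:Int) + (k:Int)) = (k:Int) by ring,
        PySem.List.pyGetD_natCast, PySem.List.pyGetD_zero]
      rw [List.getD_eq_getElem _ _ hk, List.getD_eq_getElem _ _ (by omega),
        if_pos (show ((k:Int) + 1) = PySem.List.len poly by simp [PySem.List.len_eq]; omega)]
    · have hk1 : k + 1 < poly.length := by omega
      have hrot : (poly.drop 1 ++ poly.take 1)[k]'(by simp; omega) = poly[k+1]'hk1 := by
        rw [List.getElem_append_left (by simp; omega)]
        rw [List.getElem_drop]
        congr 1
        omega
      rw [hrot]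
      simp only [show ((0:Int) + (k:Int)) = (k:Int) by ring,
        show ((k:Int) + 1) = ((k+1 : Nat) : Int) by push_cast; ring,
        PySem.List.pyGetD_natCast]
      rw [List.getD_eq_getElem _ _ hk, List.getD_eq_getElem _ _ hk1,
        if_neg (show ¬(((k+1 : Nat) : Int) = PySem.List.len poly) by simp [PySem.List.len_eq]; omega)]

theorem go_eq_zip (first a : List Int) (rest : List (List Int)) :
    get_poly_segments_go first a rest =
      ((a :: rest).zip (rest ++ [first])).map (fun ab => [ab.1, ab.2]) := by
  induction rest generalizing a with
  | nil => simp [get_poly_segments_go]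
  | cons b rs ih => simp [get_poly_segments_go, ih]

theorem getB_eq_zipForm (poly : List (List Int)) :
    get_poly_segments_alt poly = zipForm poly := by
  cases poly with
  | nil => rfl
  | cons first rest =>
    show get_poly_segments_go first first rest = zipForm (first :: rest)
    unfold zipForm
    rw [go_eq_zip]
    simp

-- ===== VERDICT (by name: the statement is the Claim_ definition above) =====
theorem get_poly_segments_spec : Claim_equal_get_poly_segments := by
  intro poly _
  show get_poly_segments poly = get_poly_segments_alt poly
  rw [getA_eq_zipForm, getB_eq_zipForm]
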